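-- pv_equiv track=rewrite | github.com/input-output-hk/acropolis-haskell-node-fork | debugging/hide_list.py | removeLists
-- ===== SOURCE A (Python) =====
-- class Parser:
--     def __init__(self, line):
--         self.buf = line
--         self.ptr = 0
--
--     def get_lexem(self):
--         res = ""
--         inside_quote = False
--         inside_screen = False
--
--         for p in range(self.ptr, len(self.buf)):
--             symbol = self.buf[p]
--
--             if inside_quote:
--                 if inside_screen:
--                     inside_screen = False
--                 else:
--                     if symbol == '\\': inside_screen = True
--                     elif symbol == '"': inside_quote = False
--
--             elif symbol == '"':
--                 inside_quote = True
--
--             res += symbol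
--             self.ptr = p+1
--             if not inside_quote: break
--
--         return res
--
-- def removeLists(ln):
--     parser = Parser(ln)
--     symbol = ""
--     nested = 0
--     contents = ""
--     res = ""
--     while (symbol := parser.get_lexem()) != "":
--         if symbol == '[':
--             nested += 1
--         elif symbol == ']':
--             if nested == 1: res += contents
--             nested -= 1
--         elif nested > 0:
--             contents = "..."
--             continue
--         else:
--             contents = ""
--
--         res += symbol
--
--     return res
-- ===== SOURCE B (Python) =====
-- def removeLists(ln):
--     out = []
--     depth = 0
--     dots = False          # True when list contents were seen (A's contents == "...")
--     in_quote = False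
--     escape = False
--     for ch in ln:
--         if in_quote:
--             if escape:
--                 escape = False
--             elif ch == '\\':
--                 escape = True
--             elif ch == '"':
--                 in_quote = False
--             if depth > 0:
--                 dots = True
--             else:
--                 dots = False
--                 out.append(ch)
--         elif ch == '"':
--             in_quote = True
--             if depth > 0:
--                 dots = True
--             else:
--                 dots = False
--                 out.append(ch)
--         elif ch == '[':
--             depth += 1
--             out.append(ch)
--         elif ch == ']':
--             if depth == 1 and dots:
--                 out.append('...')
--             depth -= 1
--             out.append(ch)
--         elif depth > 0:
--             dots = True
--         else:
--             dots = False
--             out.append(ch)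
--     return ''.join(out)
-- ===== Notes on version B (the rewrite author's own statement) =====
-- stated objective: faster
-- what changed: Replaces the Parser class (quote-aware lexer loop inside an outer while-lexem loop with quadratic res += string concatenation) by a single flat character pass maintaining (depth, dots, in_quote, escape) state that appends pieces to a list and joins once.
import Mathlib
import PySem

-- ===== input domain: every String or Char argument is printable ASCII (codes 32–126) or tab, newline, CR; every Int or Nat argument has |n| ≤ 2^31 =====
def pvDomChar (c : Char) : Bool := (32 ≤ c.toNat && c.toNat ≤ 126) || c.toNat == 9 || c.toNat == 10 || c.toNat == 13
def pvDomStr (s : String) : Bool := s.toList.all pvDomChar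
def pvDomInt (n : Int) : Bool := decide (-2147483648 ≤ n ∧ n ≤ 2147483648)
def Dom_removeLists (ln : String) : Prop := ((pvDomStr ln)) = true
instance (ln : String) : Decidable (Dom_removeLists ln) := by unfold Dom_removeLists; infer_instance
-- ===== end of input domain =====

-- B replaces A's Parser/lexer two-loop design by one flat state-machine pass over the characters (simpler; same output).

-- ===== PORT A =====
-- Parser.get_lexem: starting state (inside_quote, inside_screen); returns (lexem, remaining buffer).
def getLexemAux : List Char → Bool → Bool → List Char × List Char
  | [], _, _ => ([], [])
  | c :: rest, iq, is =>
    if iq then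
      -- quote-scanning state update, exactly A's branch order
      let st : Bool × Bool :=
        if is then (iq, false)
        else if c = '\\' then (iq, true)
        else if c = '"' then (false, is)
        else (iq, is)
      if st.1 then
        let q := getLexemAux rest st.1 st.2
        (c :: q.1, q.2)
      else ([c], rest)            -- appended c, then `if not inside_quote: break`
    else if c = '"' then
      let q := getLexemAux rest true false
      (c :: q.1, q.2)
    else ([c], rest)

lemma getLexemAux_len : ∀ (cs : List Char) (iq is : Bool),
    (getLexemAux cs iq is).2.length ≤ cs.length := by
  intro cs
  induction cs with
  | nil => intro iq is; simp [getLexemAux]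
  | cons c rest ih =>
    intro iq is
    simp only [getLexemAux]
    split_ifs <;> simp <;> exact Nat.le_succ_of_le (ih _ _)

-- A's while-loop: state (nested, contents, res); get_lexem returns "" exactly when the buffer is exhausted.
def removeListsLoop : List Char → Int → List Char → List Char → List Char
  | [], _, _, res => res
  | c :: rest, n, ct, res =>
    let q := getLexemAux (c :: rest) false false
    let sym := q.1
    if sym = ['['] then removeListsLoop q.2 (n + 1) ct (res ++ sym)
    else if sym = [']'] then
      removeListsLoop q.2 (n - 1) ct ((if n = 1 then res ++ ct else res) ++ sym)
    else if 0 < n then removeListsLoop q.2 n ['.', '.', '.'] res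
    else removeListsLoop q.2 n [] (res ++ sym)
  termination_by cs => cs.length
  decreasing_by
    all_goals
      simp only [getLexemAux]
      split_ifs <;> simp <;> exact getLexemAux_len _ _ _

def removeLists (ln : String) : String := String.mk (removeListsLoop ln.toList 0 [] [])

-- ===== PORT B =====
-- one flat pass; state = (depth, dots, in_quote, escape, out)
def altStep (st : Int × Bool × Bool × Bool × List Char) (ch : Char) :
    Int × Bool × Bool × Bool × List Char :=
  let (d, dots, iq, esc, out) := st
  if iq then
    let qs : Bool × Bool :=
      if esc then (iq, false)
      else if ch = '\\' then (iq, true)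
      else if ch = '"' then (false, esc)
      else (iq, esc)
    if 0 < d then (d, true, qs.1, qs.2, out)
    else (d, false, qs.1, qs.2, out ++ [ch])
  else if ch = '"' then
    if 0 < d then (d, true, true, esc, out)
    else (d, false, true, esc, out ++ [ch])
  else if ch = '[' then (d + 1, dots, iq, esc, out ++ ['['])
  else if ch = ']' then
    (d - 1, dots, iq, esc, (if d = 1 ∧ dots then out ++ ['.', '.', '.'] else out) ++ [']'])
  else if 0 < d then (d, true, iq, esc, out)
  else (d, false, iq, esc, out ++ [ch])

def removeLists_alt (ln : String) : String :=
  String.mk (ln.toList.foldl altStep (0, false, false, false, ([] : List Char))).2.2.2.2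

-- ===== PRECONDITION & SPEC =====
def Spec_removeLists (ln : String) (out : String) : Prop := out = removeLists_alt ln
instance (ln : String) (out : String) : Decidable (Spec_removeLists ln out) := by unfold Spec_removeLists; infer_instance

-- ===== CLAIM (what is proved, stated in full; the proofs are below) =====
def Claim_equal_removeLists : Prop := ∀ (ln : String), Dom_removeLists ln → Spec_removeLists ln (removeLists ln)

-- ===== LEMMAS AND PROOFS =====

-- Folding B over the tail of a quoted lexem (in-quote state) appends the lexem when depth ≤ 0,
-- drops it when depth > 0, and lands in the out-of-quote state on the remaining buffer.
lemma quoteFold : ∀ (cs : List Char) (is : Bool) (d : Int) (out : List Char),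
    (List.foldl altStep (d, decide (0 < d), true, is, out) cs).2.2.2.2
      = (List.foldl altStep (d, decide (0 < d), false, false,
            if 0 < d then out else out ++ (getLexemAux cs true is).1)
          (getLexemAux cs true is).2).2.2.2.2 := by
  intro cs
  induction cs with
  | nil =>
    intro is d out
    simp [getLexemAux]
  | cons c rest ih =>
    intro is d out
    by_cases his : is = true
    · subst his
      simp only [getLexemAux, List.foldl_cons]
      by_cases hd : 0 < d
      · simpa [altStep, hd] using ih false d out
      · simpa [altStep, hd, List.append_assoc] using ih false d (out ++ [c])
    · replace his : is = false := by cases is <;> simp_all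
      subst his
      by_cases hb : c = '\\'
      · subst hb
        simp only [getLexemAux, List.foldl_cons]
        by_cases hd : 0 < d
        · simpa [altStep, hd] using ih true d out
        · simpa [altStep, hd, List.append_assoc] using ih true d (out ++ ['\\'])
      · by_cases hq : c = '"'
        · subst hq
          simp only [getLexemAux, List.foldl_cons]
          by_cases hd : 0 < d <;> simp [altStep, hd, hb]
        · simp only [getLexemAux, List.foldl_cons]
          by_cases hd : 0 < d
          · simpa [altStep, hd, hb, hq] using ih false d out
          · simpa [altStep, hd, hb, hq, List.append_assoc] using ih false d (out ++ [c])

-- Main loop invariant: A's loop state (n, contents, res) matches B's fold state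
-- (n, dots, false, false, res) with contents = "..." iff dots.
lemma mainLoop : ∀ (N : ℕ) (cs : List Char), cs.length ≤ N →
    ∀ (n : Int) (dots : Bool) (res : List Char),
    removeListsLoop cs n (if dots then ['.', '.', '.'] else []) res
      = (List.foldl altStep (n, dots, false, false, res) cs).2.2.2.2 := by
  intro N
  induction N with
  | zero =>
    intro cs hcs n dots res
    have : cs = [] := List.eq_nil_of_length_eq_zero (Nat.le_zero.mp hcs)
    subst this
    simp [removeListsLoop]
  | succ N ih =>
    intro cs hcs n dots res
    match cs with
    | [] => simp [removeListsLoop]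
    | c :: rest =>
      have hrest : rest.length ≤ N := by simpa using hcs
      by_cases hq : c = '"'
      · subst hq
        have hr : (getLexemAux rest true false).2.length ≤ N :=
          le_trans (getLexemAux_len _ _ _) hrest
        have hsplit : getLexemAux ('"' :: rest) false false
            = ('"' :: (getLexemAux rest true false).1, (getLexemAux rest true false).2) := by
          simp [getLexemAux]
        simp only [removeListsLoop, hsplit, List.foldl_cons]
        simp only [if_neg (by simp : ¬('"' :: (getLexemAux rest true false).1 = ['['])),
          if_neg (by simp : ¬('"' :: (getLexemAux rest true false).1 = [']']))]
        by_cases hd : 0 < n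
        · have hquote := quoteFold rest false n res
          rw [show (decide (0 < n)) = true by simpa using hd, if_pos hd] at hquote
          simp only [altStep]
          simp only [hd, ite_true, ite_false, Bool.false_eq_true]
          rw [hquote]
          exact ih _ hr n true res
        · have hquote := quoteFold rest false n (res ++ ['"'])
          rw [show (decide (0 < n)) = false by simpa using hd, if_neg hd] at hquote
          simp only [altStep]
          simp only [hd, ite_true, ite_false, Bool.false_eq_true]
          rw [hquote]
          simpa [List.append_assoc] using
            ih _ hr n false ((res ++ ['"']) ++ (getLexemAux rest true false).1)
      · have hsplit : getLexemAux (c :: rest) false false = ([c], rest) := by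
          simp [getLexemAux, hq]
        simp only [removeListsLoop, hsplit, List.foldl_cons]
        by_cases hl : c = '['
        · subst hl
          simp only [reduceIte, altStep]
          simpa using ih _ hrest (n + 1) dots (res ++ ['['])
        · by_cases hrb : c = ']'
          · subst hrb
            simp only [if_neg (by simp : ¬([']'] = (['['] : List Char))), reduceIte, altStep]
            have harg : (if n = 1 then res ++ (if dots then ['.', '.', '.'] else []) else res)
                = (if n = 1 ∧ dots = true then res ++ ['.', '.', '.'] else res) := by
              by_cases h1 : n = 1 <;> cases dots <;> simp [h1]
            simpa [hq, hl, harg] using ih _ hrest (n - 1) dots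
              ((if n = 1 ∧ dots = true then res ++ ['.', '.', '.'] else res) ++ [']'])
          · simp only [if_neg (by simp [hl] : ¬([c] = (['['] : List Char))),
              if_neg (by simp [hrb] : ¬([c] = ([']'] : List Char))), altStep]
            by_cases hd : 0 < n
            · simpa [hq, hl, hrb, hd] using ih _ hrest n true res
            · simpa [hq, hl, hrb, hd] using ih _ hrest n false (res ++ [c])

-- ===== VERDICT (by name: the statement is the Claim_ definition above) =====
theorem removeLists_spec : Claim_equal_removeLists := by
  intro ln _
  unfold Spec_removeLists removeLists removeLists_alt
  have h := mainLoop ln.toList.length ln.toList (le_refl _) 0 false []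
  exact congrArg String.mk (by simpa using h)
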